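-- pv_equiv track=rewrite | github.com/kevin011602/thesis-appendix-materials | fm_index/fm_index_demo.py | build_C
-- ===== SOURCE A (Python) =====
-- from collections import Counter
-- from typing import Dict, List, Tuple, Optional
--
-- def build_C(L: str) -> Dict[str, int]:
--     counts = Counter(L)
--     alphabet = sorted(counts.keys())
--     C: Dict[str, int] = {}
--     total = 0
--     for c in alphabet:
--         C[c] = total
--         total += counts[c]
--     return C
-- ===== SOURCE B (Python) =====
-- def build_C(L: str):
--     C = {}
--     for i, c in enumerate(sorted(L)):
--         if c not in C:
--             C[c] = i
--     return C
-- ===== Notes on version B (the rewrite author's own statement) =====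
-- stated objective: alternative
-- what changed: Instead of counting characters with Counter and accumulating a running total over the sorted alphabet, B sorts the whole string and records, in one enumerate pass, the index of each character's first occurrence in the sorted string, which equals its cumulative count.
import Mathlib
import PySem

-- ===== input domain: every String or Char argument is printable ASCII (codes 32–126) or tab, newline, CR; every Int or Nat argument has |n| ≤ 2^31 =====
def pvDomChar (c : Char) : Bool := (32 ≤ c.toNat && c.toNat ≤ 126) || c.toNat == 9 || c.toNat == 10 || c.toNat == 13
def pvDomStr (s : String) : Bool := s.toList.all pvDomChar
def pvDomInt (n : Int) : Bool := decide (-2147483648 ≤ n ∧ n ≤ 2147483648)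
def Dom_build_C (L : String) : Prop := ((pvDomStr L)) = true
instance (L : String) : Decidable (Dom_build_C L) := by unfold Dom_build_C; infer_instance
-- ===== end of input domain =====

-- B replaces count-then-accumulate with sort-the-whole-string + first-occurrence indices (alternative decomposition, same result).


-- ===== PORT A =====
def build_C (L : String) : List (String × Int) :=
  let counts := PySem.Dict.counter L.toList
  let alphabet := PySem.List.sorted counts.keys (fun c => c) false
  let res := alphabet.foldl
      (fun (p : PySem.Dict String Int × Int) c =>
        (p.1.insert (String.ofList [c]) p.2, p.2 + counts.getD c 0))
      (PySem.Dict.empty, 0)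
  res.1.items

-- ===== PORT B =====
def build_C_alt (L : String) : List (String × Int) :=
  let s := PySem.List.sorted L.toList (fun c => c) false
  let C := (PySem.List.enumerate s 0).foldl
      (fun (C : PySem.Dict String Int) ic =>
        if C.contains (String.ofList [ic.2]) then C else C.insert (String.ofList [ic.2]) ic.1)
      PySem.Dict.empty
  C.items

-- ===== PRECONDITION & SPEC =====
def Spec_build_C (L : String) (out : List (String × Int)) : Prop := out = build_C_alt L
instance (L : String) (out : List (String × Int)) : Decidable (Spec_build_C L out) := by unfold Spec_build_C; infer_instance

-- ===== CLAIM (what is proved, stated in full; the proofs are below) =====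
def Claim_equal_build_C : Prop := ∀ (L : String), Dom_build_C L → Spec_build_C L (build_C L)

-- ===== LEMMAS AND PROOFS =====

def mkc (c : Char) : String := String.ofList [c]
lemma mkc_inj {a b : Char} (h : mkc a = mkc b) : a = b := by
  have := congrArg String.toList h
  simpa [mkc] using this
def cum (cnt : Char → Int) : List Char → Int → List (String × Int)
  | [], _ => []
  | c :: al, t => (mkc c, t) :: cum cnt al (t + cnt c)

lemma aLoop (cnt : Char → Int) :
    ∀ (al : List Char) (d : PySem.Dict String Int) (t : Int),
      al.Pairwise (· < ·) →
      (∀ c ∈ al, d.contains (mkc c) = false) →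
      ((al.foldl
          (fun (p : PySem.Dict String Int × Int) c =>
            (p.1.insert (mkc c) p.2, p.2 + cnt c)) (d, t)).1).items
        = d.items ++ cum cnt al t
  | [], d, t, _, _ => by simp [cum]
  | c :: al, d, t, hp, hf => by
    have hfc : d.contains (mkc c) = false := hf c (List.mem_cons_self)
    have hfresh : ∀ c' ∈ al, (d.insert (mkc c) t).contains (mkc c') = false := by
      intro c' hc'
      rw [PySem.Dict.contains_insert]
      have hne : c' ≠ c := by
        have := (List.pairwise_cons.mp hp).1 c' hc'
        exact fun h => by simp [h] at this
      have hb : (mkc c' == mkc c) = false := by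
        simp only [beq_eq_false_iff_ne]
        exact fun h => hne (mkc_inj h)
      simp [hb, hf c' (List.mem_cons_of_mem _ hc')]
    simp only [List.foldl_cons, cum]
    rw [aLoop cnt al (d.insert (mkc c) t) (t + cnt c) (List.Pairwise.of_cons hp) hfresh,
        PySem.Dict.items_insert_of_not_contains d t hfc]
    simp

def fo : List Char → Int → List Char → List (String × Int)
  | [], _, _ => []
  | c :: s, i, seen =>
      if seen.contains c then fo s (i + 1) seen
      else (mkc c, i) :: fo s (i + 1) (c :: seen)

lemma bLoop :
    ∀ (s : List Char) (i : Int) (d : PySem.Dict String Int) (seen : List Char),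
      (∀ x : Char, d.contains (mkc x) = seen.contains x) →
      ((PySem.List.enumerate s i).foldl
          (fun (C : PySem.Dict String Int) ic =>
            if C.contains (mkc ic.2) then C else C.insert (mkc ic.2) ic.1) d).items
        = d.items ++ fo s i seen
  | [], i, d, seen, _ => by simp [fo, PySem.List.enumerate_nil]
  | c :: s, i, d, seen, hseen => by
    rw [PySem.List.enumerate_cons]
    simp only [List.foldl_cons, fo]
    by_cases h : seen.contains c = true
    · rw [hseen c, if_pos h, if_pos h, bLoop s (i + 1) d seen hseen]
    · have h' : seen.contains c = false := by simpa using h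
      have hnm : c ∉ seen := by simpa [List.contains_eq_mem] using h'
      rw [hseen c, if_neg (by simp [hnm]), if_neg (by simp [hnm])]
      have hseen' : ∀ x : Char, (d.insert (mkc c) i).contains (mkc x) = (c :: seen).contains x := by
        intro x
        rw [PySem.Dict.contains_insert]
        by_cases hx : x = c
        · subst hx; simp
        · have hb : (mkc x == mkc c) = false := by
            simp only [beq_eq_false_iff_ne]
            exact fun h => hx (mkc_inj h)
          simp [hb, hseen x, hx]
      rw [bLoop s (i + 1) (d.insert (mkc c) i) (c :: seen) hseen',
          PySem.Dict.items_insert_of_not_contains d i (by rw [hseen c]; exact h')]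
      simp

lemma fo_sorted :
    ∀ (s : List Char) (i : Int) (seen al : List Char),
      s.Pairwise (· ≤ ·) →
      al.Pairwise (· < ·) →
      (∀ x, x ∈ al ↔ x ∈ s ∧ x ∉ seen) →
      fo s i seen
        = al.map (fun c => (mkc c, i + (s.countP (fun x => decide (x < c)) : Int)))
  | [], i, seen, al, _, _, hmem => by
    have : al = [] := by
      cases al with
      | nil => rfl
      | cons a t => exact absurd ((hmem a).mp List.mem_cons_self).1 (by simp)
    simp [fo, this]
  | c :: s, i, seen, al, hs, hal, hmem => by
    have hsle : ∀ x ∈ s, c ≤ x := (List.pairwise_cons.mp hs).1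
    by_cases h : c ∈ seen
    · -- skip: c already seen
      have hc : seen.contains c = true := by simpa [List.contains_eq_mem] using h
      simp only [fo, hc, if_true]
      have hmem' : ∀ x, x ∈ al ↔ x ∈ s ∧ x ∉ seen := by
        intro x
        rw [hmem x]
        constructor
        · rintro ⟨hx, hns⟩
          rcases List.mem_cons.mp hx with rfl | hx
          · exact absurd h hns
          · exact ⟨hx, hns⟩
        · rintro ⟨hx, hns⟩; exact ⟨List.mem_cons_of_mem _ hx, hns⟩
      rw [fo_sorted s (i+1) seen al (List.Pairwise.of_cons hs) hal hmem']
      apply List.map_congr_left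
      intro a ha
      have hlt : c < a := by
        rcases (hmem' a).mp ha with ⟨has, hns⟩
        rcases lt_or_eq_of_le (hsle a has) with h' | h'
        · exact h'
        · exact absurd (h' ▸ h) hns
      simp only [List.countP_cons, decide_eq_true_eq, if_pos hlt]
      push_cast; ring_nf
    · -- new char: head of al must be c
      have hc : seen.contains c = false := by simpa [List.contains_eq_mem] using h
      simp only [fo, hc, Bool.false_eq_true, if_false]
      have hc_al : c ∈ al := (hmem c).mpr ⟨List.mem_cons_self, h⟩
      obtain ⟨a, al', rfl⟩ : ∃ a al', al = a :: al' := by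
        cases al with
        | nil => simp at hc_al
        | cons a t => exact ⟨a, t, rfl⟩
      have ha_ge : c ≤ a := by
        rcases List.mem_cons.mp ((hmem a).mp List.mem_cons_self).1 with rfl | hx
        · rfl
        · exact hsle a hx
      have hac : a = c := by
        rcases List.mem_cons.mp hc_al with rfl | hc'
        · rfl
        · have := (List.pairwise_cons.mp hal).1 c hc'
          exact absurd (lt_of_le_of_lt ha_ge this) (lt_irrefl c)
      subst hac
      have hmem' : ∀ x, x ∈ al' ↔ x ∈ s ∧ x ∉ (a :: seen) := by
        intro x
        constructor
        · intro hx
          have hxa : a < x := (List.pairwise_cons.mp hal).1 x hx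
          rcases (hmem x).mp (List.mem_cons_of_mem _ hx) with ⟨hxs, hns⟩
          have hxne : x ≠ a := ne_of_gt hxa
          rcases List.mem_cons.mp hxs with rfl | hxs'
          · exact absurd rfl hxne
          · exact ⟨hxs', by simp [hxne, hns]⟩
        · rintro ⟨hxs, hns⟩
          have hxne : x ≠ a := fun h' => hns (h' ▸ List.mem_cons_self)
          have hnseen : x ∉ seen := fun h' => hns (List.mem_cons_of_mem _ h')
          have : x ∈ a :: al' := (hmem x).mpr ⟨List.mem_cons_of_mem _ hxs, hnseen⟩
          rcases List.mem_cons.mp this with rfl | hx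
          · exact absurd rfl hxne
          · exact hx
      rw [fo_sorted s (i+1) (a :: seen) al' (List.Pairwise.of_cons hs) (List.Pairwise.of_cons hal) hmem']
      simp only [List.map_cons]
      congr 1
      · -- head value: countP (< a) (a :: s) = 0
        have : (a :: s).countP (fun x => decide (x < a)) = 0 := by
          rw [List.countP_eq_zero]
          intro x hx
          rcases List.mem_cons.mp hx with rfl | hx'
          · simp
          · simpa using not_lt_of_ge (hsle x hx')
        simp [this]
      · apply List.map_congr_left
        intro b hb
        have hlt : a < b := (List.pairwise_cons.mp hal).1 b hb
        simp only [List.countP_cons, decide_eq_true_eq, if_pos hlt]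
        push_cast; ring_nf

lemma countP_split (c : Char) (rest : List Char) (hc : rest.contains c = false) :
    ∀ l : List Char,
      l.countP (fun x => !rest.contains x)
        = l.countP (fun x => !((c :: rest).contains x)) + l.count c
  | [] => by simp
  | x :: l => by
    simp only [List.countP_cons, List.count_cons]
    rw [countP_split c rest hc l]
    by_cases hx : x = c
    · subst hx
      have : x ∉ rest := by simpa [List.contains_eq_mem] using hc
      simp [this]; omega
    · simp only [List.contains_cons]
      have : (x == c) = false := by simpa using hx
      simp [this]; omega

lemma cum_spec (L' : List Char) :
    ∀ (al : List Char) (t : Int) (cnt : Char → Int),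
      al.Pairwise (· < ·) →
      (∀ x ∈ L', x ∈ al ∨ ∀ c ∈ al, x < c) →
      (∀ c ∈ al, cnt c = (L'.count c : Int)) →
      t = (L'.countP (fun x => !(al.contains x)) : Int) →
      cum cnt al t
        = al.map (fun c => (mkc c, (L'.countP (fun x => decide (x < c)) : Int)))
  | [], t, cnt, _, _, _, _ => by simp [cum]
  | c :: al, t, cnt, hp, hcomp, hcnt, ht => by
    have hcal : c ∉ al := fun hin => absurd ((List.pairwise_cons.mp hp).1 c hin) (lt_irrefl c)
    have hcrest : al.contains c = false := by simpa [List.contains_eq_mem] using hcal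
    simp only [cum, List.map_cons]
    have hhead : t = (L'.countP (fun x => decide (x < c)) : Int) := by
      rw [ht]
      congr 1
      apply List.countP_congr
      intro x hx
      by_cases hmem : x ∈ (c :: al)
      · have h1 : (c :: al).contains x = true := by simpa [List.contains_eq_mem] using hmem
        have h2 : ¬ (x < c) := by
          rcases List.mem_cons.mp hmem with rfl | hin
          · exact lt_irrefl x
          · exact not_lt_of_gt ((List.pairwise_cons.mp hp).1 x hin)
        simp only [h1, Bool.not_true, decide_eq_true_eq]
        simp [h2]
      · have h1 : (c :: al).contains x = false := by simpa [List.contains_eq_mem] using hmem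
        have h2 : x < c := by
          rcases hcomp x hx with hin | hall
          · exact absurd hin hmem
          · exact hall c List.mem_cons_self
        simp only [h1, Bool.not_false, decide_eq_true_eq]
        simp [h2]
    have hcomp' : ∀ x ∈ L', x ∈ al ∨ ∀ c' ∈ al, x < c' := by
      intro x hx
      rcases hcomp x hx with hin | hall
      · rcases List.mem_cons.mp hin with rfl | hin'
        · exact Or.inr fun c' hc' => (List.pairwise_cons.mp hp).1 c' hc'
        · exact Or.inl hin'
      · exact Or.inr fun c' hc' => hall c' (List.mem_cons_of_mem _ hc')
    have hcnt' : ∀ c' ∈ al, cnt c' = (L'.count c' : Int) := fun c' hc' =>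
      hcnt c' (List.mem_cons_of_mem _ hc')
    have ht' : t + cnt c = (L'.countP (fun x => !(al.contains x)) : Int) := by
      rw [ht, hcnt c List.mem_cons_self, countP_split c al hcrest L']
      push_cast; ring
    rw [cum_spec L' al (t + cnt c) cnt (List.Pairwise.of_cons hp) hcomp' hcnt' ht', hhead]



lemma build_C_eq_alt (L : String) : build_C L = build_C_alt L := by
  show ((PySem.List.sorted (PySem.Dict.counter L.toList).keys (fun c => c) false).foldl
      (fun (p : PySem.Dict String Int × Int) c =>
        (p.1.insert (String.ofList [c]) p.2, p.2 + (PySem.Dict.counter L.toList).getD c 0))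
      (PySem.Dict.empty, 0)).1.items
    = ((PySem.List.enumerate (PySem.List.sorted L.toList (fun c => c) false) 0).foldl
      (fun (C : PySem.Dict String Int) ic =>
        if C.contains (String.ofList [ic.2]) then C else C.insert (String.ofList [ic.2]) ic.1)
      PySem.Dict.empty).items
  rw [PySem.Dict.keys_counter]
  have hal_lt : (PySem.List.sorted (PySem.Set.ofList L.toList) (fun c => c) false).Pairwise (· < ·) :=
    PySem.List.sorted_ofList_pairwise_lt L.toList
  have hmem_al : ∀ x, x ∈ PySem.List.sorted (PySem.Set.ofList L.toList) (fun c => c) false ↔ x ∈ L.toList := by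
    intro x
    rw [PySem.List.mem_sorted, PySem.Set.mem_ofList]
  -- A side
  have hA := aLoop (fun c => (PySem.Dict.counter L.toList).getD c 0)
      (PySem.List.sorted (PySem.Set.ofList L.toList) (fun c => c) false)
      PySem.Dict.empty 0 hal_lt (fun c _ => PySem.Dict.contains_empty _)
  simp only [mkc] at hA
  rw [hA]
  have hcum := cum_spec L.toList
      (PySem.List.sorted (PySem.Set.ofList L.toList) (fun c => c) false) 0
      (fun c => (PySem.Dict.counter L.toList).getD c 0) hal_lt
      (fun x hx => Or.inl ((hmem_al x).mpr hx))
      (fun c _ => PySem.Dict.getD_counter L.toList c)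
      (by
        have : L.toList.countP
            (fun x => !((PySem.List.sorted (PySem.Set.ofList L.toList) (fun c => c) false).contains x)) = 0 := by
          rw [List.countP_eq_zero]
          intro x hx
          simp [List.contains_eq_mem, (hmem_al x).mpr hx]
        rw [this]; simp)
  rw [hcum]
  -- B side
  have hB := bLoop (PySem.List.sorted L.toList (fun c => c) false) 0 PySem.Dict.empty []
      (fun x => by simp [PySem.Dict.contains_empty])
  simp only [mkc] at hB
  rw [hB]
  have hfo := fo_sorted (PySem.List.sorted L.toList (fun c => c) false) 0 []
      (PySem.List.sorted (PySem.Set.ofList L.toList) (fun c => c) false)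
      (by simpa using PySem.List.sorted_pairwise L.toList (fun c => c))
      hal_lt
      (by
        intro x
        rw [hmem_al x, PySem.List.mem_sorted]
        simp)
  rw [hfo]
  simp only [zero_add]
  apply List.map_congr_left
  intro c _
  have hperm := (PySem.List.sorted_perm L.toList (fun c => c) false).countP_eq
      (fun x => decide (x < c))
  rw [hperm]

-- ===== VERDICT (by name: the statement is the Claim_ definition above) =====
theorem build_C_spec : Claim_equal_build_C := by
  intro L _
  unfold Spec_build_C
  exact build_C_eq_alt L
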